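-- pv_equiv track=rewrite | github.com/pierrotlamontagne/CRAP-Combined-Rv-Analysis-Program | rv_analysis_tools.py | separate_gp_params
-- ===== SOURCE A (Python) =====
-- def separate_gp_params(comb_params, i_shared, instruments):
--     """
--     Separate the combined parameter vector into GP parameters for each instrument.
--
--     Parameters:
--         comb_params (list): Combined parameter vector.
--         i_shared (list): Indices of shared GP parameters.
--         instruments (list): List of instruments.
--
--     Returns:
--         tuple: (params_list, params_dict)
--             - params_list (list): List of separated GP parameters for all instruments.
--             - params_dict (dict): Dictionary of GP parameters for each instrument.
--     """
--     params_dict = {instrument: [] for instrument in instruments}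
--     params_list = []
--
--     param_id = 0 # Index of the parameter
--     i = 0 # Index of the combined parameters
--     while i < len(comb_params):
--         if param_id in i_shared:
--             # Shared parameters, assign to all instruments
--             for instrument in instruments:
--                 params_dict[instrument].append(comb_params[i])
--             i += 1
--         else:
--             # Separate parameters for each instrument
--             for instrument in instruments:
--                 params_dict[instrument].append(comb_params[i])
--                 i += 1
--
--         param_id += 1
--
--     # Create params_list
--     for instrument in instruments:
--         params_list += params_dict[instrument]
--
--     return params_list, params_dict
-- ===== SOURCE B (Python) =====
-- def separate_gp_params(comb_params, i_shared, instruments):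
--     """Index-table reimplementation: one pass over comb_params builds a block
--     table (start_index, is_shared); then each instrument name's parameters are
--     gathered in a per-name pass over the table, using the name's occurrence
--     positions within the instrument list."""
--     shared = set(i_shared)
--     n = len(comb_params)
--     m = len(instruments)
--
--     # Pass 1: block table.
--     blocks = []
--     i = 0
--     param_id = 0
--     while i < n:
--         if param_id in shared:
--             blocks.append((i, True))
--             i += 1
--         else:
--             blocks.append((i, False))
--             i += m
--         param_id += 1
--
--     # Occurrence positions of each instrument name.
--     positions = {}
--     for j, instrument in enumerate(instruments):
--         positions.setdefault(instrument, []).append(j)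
--
--     # Pass 2: gather per instrument name.
--     params_dict = {
--         k: [comb_params[s] if sh else comb_params[s + j]
--             for (s, sh) in blocks for j in js]
--         for k, js in positions.items()
--     }
--     params_list = []
--     for instrument in instruments:
--         params_list += params_dict[instrument]
--     return params_list, params_dict
-- ===== Notes on version B (the rewrite author's own statement) =====
-- stated objective: alternative
-- what changed: A fills every instrument's dict entry while walking comb_params block by block; B first walks comb_params once to build an index table of blocks (start_index, is_shared), groups the occurrence positions of each instrument name, and then fills each name's list in a separate gather pass over the table, concatenating per occurrence.
import Mathlib
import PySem

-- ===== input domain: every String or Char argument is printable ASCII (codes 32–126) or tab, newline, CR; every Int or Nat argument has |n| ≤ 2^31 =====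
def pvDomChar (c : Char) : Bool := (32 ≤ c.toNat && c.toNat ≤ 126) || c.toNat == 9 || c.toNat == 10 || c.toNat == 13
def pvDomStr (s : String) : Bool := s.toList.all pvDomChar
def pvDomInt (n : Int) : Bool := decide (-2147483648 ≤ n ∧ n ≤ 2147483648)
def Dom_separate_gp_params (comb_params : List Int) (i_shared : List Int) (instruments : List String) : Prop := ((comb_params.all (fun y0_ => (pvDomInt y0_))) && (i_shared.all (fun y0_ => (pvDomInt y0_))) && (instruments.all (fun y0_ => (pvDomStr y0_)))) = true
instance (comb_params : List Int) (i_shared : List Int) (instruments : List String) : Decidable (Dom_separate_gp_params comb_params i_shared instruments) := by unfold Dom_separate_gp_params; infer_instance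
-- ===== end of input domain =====

-- B replaces A's block-by-block filling of a dict with a block index table built in one pass
-- plus a per-instrument-name gather pass over it (objective: alternative decomposition).

-- ===== PORT A =====
-- A's while loop, ported with fuel = len(comb_params) + 1 (enough whenever the Python loop
-- terminates: with instruments nonempty every iteration advances i by at least 1).
-- comb_params[i] is read with List.getD (i : Nat, so never negative); an out-of-range read,
-- where Python raises IndexError, yields 0 here — such inputs are excluded by Pre_.
def pvLoopA (cp : List Int) (sh : List Int) (insts : List String) :
    Nat → Nat → Int → PySem.Dict String (List Int) → PySem.Dict String (List Int)
  | 0, _, _, d => d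
  | fuel+1, i, p, d =>
    if i < cp.length then
      if p ∈ sh then
        pvLoopA cp sh insts fuel (i+1) (p+1)
          (insts.foldl (fun d inst => d.modify inst [] (· ++ [cp.getD i 0])) d)
      else
        let st := insts.foldl
          (fun (st : PySem.Dict String (List Int) × Nat) inst =>
            (st.1.modify inst [] (· ++ [cp.getD st.2 0]), st.2 + 1)) (d, i)
        pvLoopA cp sh insts fuel st.2 (p+1) st.1
    else d

def separate_gp_params (comb_params : List Int) (i_shared : List Int) (instruments : List String) : List Int × (List (String × List Int)) :=
  let d0 : PySem.Dict String (List Int) :=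
    instruments.foldl (fun d inst => d.insert inst []) (PySem.Dict.mk [])
  let d := pvLoopA comb_params i_shared instruments (comb_params.length + 1) 0 0 d0
  let params_list := instruments.foldl (fun acc inst => acc ++ d.getD inst []) []
  (params_list, d.items)

-- ===== PORT B =====
-- Pass 1 of Source B: the block table [(start_index, is_shared)], same fuel bound as A's loop.
def pvBlocks (n m : Nat) (sh : List Int) : Nat → Nat → Int → List (Nat × Bool)
  | 0, _, _ => []
  | fuel+1, i, p =>
    if i < n then
      if p ∈ sh then (i, true) :: pvBlocks n m sh fuel (i+1) (p+1)
      else (i, false) :: pvBlocks n m sh fuel (i+m) (p+1)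
    else []

-- Rest of Source B: occurrence positions of each name (positions.setdefault(...).append(j)
-- is d[k] = d.get(k, []) + [j], i.e. Dict.modify), then the per-name gather comprehension
-- (comb_params[s] / comb_params[s+j] read with List.getD; inside Pre_ every such index is
-- in range, as in the Python), then the params_list concatenation loop.
def separate_gp_params_alt (comb_params : List Int) (i_shared : List Int) (instruments : List String) : List Int × (List (String × List Int)) :=
  let n := comb_params.length
  let m := instruments.length
  let blocks := pvBlocks n m i_shared (n+1) 0 0
  let pos := (PySem.List.enumerate instruments).foldl
    (fun (d : PySem.Dict String (List Int)) ji => d.modify ji.2 [] (· ++ [ji.1]))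
    (PySem.Dict.mk [])
  let pd := PySem.Dict.ofList (pos.items.map (fun kjs =>
    (kjs.1, blocks.flatMap (fun b => kjs.2.map (fun j =>
      if b.2 then comb_params.getD b.1 0 else comb_params.getD (b.1 + j.toNat) 0)))))
  let params_list := instruments.foldl (fun acc inst => acc ++ pd.getD inst []) []
  (params_list, pd.items)

-- ===== PRECONDITION & SPEC =====
-- pvConsumed i_shared m p = how many entries of comb_params the first p parameter blocks consume.
def pvConsumed (i_shared : List Int) (m : Nat) (p : Nat) : Nat :=
  ((List.range p).map (fun q => if (q : Int) ∈ i_shared then 1 else m)).sum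

-- Pre_ excludes exactly the inputs whose length does not line up with the block structure:
-- there Python A raises IndexError mid-block (or loops forever when instruments is empty),
-- so it returns no value.
def Pre_separate_gp_params (comb_params : List Int) (i_shared : List Int) (instruments : List String) : Prop :=
  ∃ p ≤ comb_params.length, pvConsumed i_shared instruments.length p = comb_params.length
instance (comb_params : List Int) (i_shared : List Int) (instruments : List String) : Decidable (Pre_separate_gp_params comb_params i_shared instruments) := by unfold Pre_separate_gp_params; infer_instance

def pvWitness_separate_gp_params : List Int × List Int × List String :=
  ([1, 2, 3], [0], ["a", "b"])

def Spec_separate_gp_params (comb_params : List Int) (i_shared : List Int) (instruments : List String) (out : List Int × (List (String × List Int))) : Prop := out = separate_gp_params_alt comb_params i_shared instruments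
instance (comb_params : List Int) (i_shared : List Int) (instruments : List String) (out : List Int × (List (String × List Int))) : Decidable (Spec_separate_gp_params comb_params i_shared instruments out) := by unfold Spec_separate_gp_params; infer_instance

-- ===== CLAIM (what is proved, stated in full; the proofs are below) =====
def Claim_equal_separate_gp_params : Prop := ∀ (comb_params : List Int) (i_shared : List Int) (instruments : List String), Dom_separate_gp_params comb_params i_shared instruments → Pre_separate_gp_params comb_params i_shared instruments → Spec_separate_gp_params comb_params i_shared instruments (separate_gp_params comb_params i_shared instruments)

-- ===== LEMMAS AND PROOFS =====

-- kept lemmas from before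
theorem pvModify_cons (k inst : String) (y : List Int) (l : List (String × List Int))
    (g : List Int → List Int) (h : k ≠ inst) :
    (PySem.Dict.mk ((inst, y) :: l)).modify k [] g
      = PySem.Dict.mk ((inst, y) :: ((PySem.Dict.mk l).modify k [] g).items) := by
  have hne : (inst == k) = false := by simp [Ne.symm h]
  by_cases hc : (l.any fun p => p.1 == k) = true <;>
    simp [PySem.Dict.modify, PySem.Dict.insert, PySem.Dict.contains, PySem.Dict.getD,
      PySem.Dict.get?, hne, hc, Ne.symm h]

theorem pvModify_head (inst : String) (y : List Int) (l : List (String × List Int))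
    (g : List Int → List Int) (hfresh : ∀ q ∈ l, q.1 ≠ inst) :
    (PySem.Dict.mk ((inst, y) :: l)).modify inst [] g = PySem.Dict.mk ((inst, g y) :: l) := by
  simp only [PySem.Dict.modify, PySem.Dict.insert, PySem.Dict.contains, PySem.Dict.getD,
    PySem.Dict.get?]
  simp only [List.any_cons, beq_self_eq_true, Bool.true_or, if_pos, List.find?_cons,
    List.map_cons]
  simp
  induction l with
  | nil => rfl
  | cons q rs ihq =>
    simp only [List.map_cons, List.cons.injEq]
    exact ⟨by simp [hfresh q (by simp)], ihq (fun q hq => hfresh q (List.mem_cons_of_mem _ hq))⟩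

-- dict shaped by a distinct key list
def pvShapeK (K : List String) (f : String → List Int) : List (String × List Int) :=
  K.map (fun k => (k, f k))

theorem pvModify_fresh (k : String) (l : List (String × List Int))
    (g : List Int → List Int) (hfresh : ∀ q ∈ l, q.1 ≠ k) :
    (PySem.Dict.mk l).modify k [] g = PySem.Dict.mk (l ++ [(k, g [])]) := by
  have hnc : ((PySem.Dict.mk l).contains k) = false := by
    simp [PySem.Dict.contains]
    exact fun a b hab h => absurd h (hfresh (a, b) hab)
  have hg : (PySem.Dict.mk l).getD k [] = [] := by
    simp [PySem.Dict.getD, PySem.Dict.get?]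
    rw [List.find?_eq_none.2 (fun q hq => by simp [hfresh q hq])]
    rfl
  simp [PySem.Dict.modify, hg, PySem.Dict.insert, hnc]

theorem pvModifyK (k : String) (g : List Int → List Int) :
    ∀ (K : List String) (f : String → List Int), K.Nodup → k ∈ K →
    (PySem.Dict.mk (pvShapeK K f)).modify k [] g
      = PySem.Dict.mk (pvShapeK K (fun k' => if k' = k then g (f k) else f k')) := by
  intro K
  induction K with
  | nil => intro f _ h; simp at h
  | cons x rest ih =>
    intro f hnd hk
    by_cases hx : k = x
    · subst hx
      simp only [pvShapeK, List.map_cons]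
      rw [pvModify_head k (f k) _ g (fun q hq => by
        rcases List.mem_map.1 hq with ⟨k', hk', rfl⟩
        rintro rfl
        exact (List.nodup_cons.1 hnd).1 hk')]
      refine congrArg PySem.Dict.mk (congrArg₂ List.cons (by simp) (List.map_congr_left (fun k' hk' => ?_)))
      have hne : k' ≠ k := fun h => (List.nodup_cons.1 hnd).1 (h ▸ hk')
      simp [hne]
    · have hkr : k ∈ rest := by rcases List.mem_cons.1 hk with h | h; exact absurd h hx; exact h
      simp only [pvShapeK, List.map_cons]
      rw [pvModify_cons k x (f x) _ g hx]
      rw [show (PySem.Dict.mk (List.map (fun k => (k, f k)) rest)) = PySem.Dict.mk (pvShapeK rest f) from rfl,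
        ih f (List.nodup_cons.1 hnd).2 hkr]
      simp [pvShapeK, Ne.symm hx]

-- initial dict comprehension: ordered distinct keys, all values []
theorem pvInitK :
    ∀ (l : List String) (S : PySem.Set String), S.Nodup →
    l.foldl (fun d x => d.insert x ([] : List Int)) (PySem.Dict.mk (pvShapeK S (fun _ => [])))
      = PySem.Dict.mk (pvShapeK (PySem.Set.update S l) (fun _ => [])) := by
  intro l
  induction l with
  | nil => intro S _; rfl
  | cons x rest ih =>
    intro S hnd
    simp only [List.foldl_cons]
    by_cases hx : x ∈ S
    · have hc : (PySem.Dict.mk (pvShapeK S (fun _ => ([] : List Int)))).contains x = true := by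
        simp only [PySem.Dict.contains, pvShapeK, List.any_map]
        exact List.any_eq_true.2 ⟨x, hx, by simp⟩
      have hins : (PySem.Dict.mk (pvShapeK S (fun _ => ([] : List Int)))).insert x ([] : List Int)
          = PySem.Dict.mk (pvShapeK S (fun _ => [])) := by
        simp only [PySem.Dict.insert, hc, if_pos]
        refine congrArg PySem.Dict.mk ?_
        simp only [pvShapeK, List.map_map]
        refine List.map_congr_left (fun k hk => ?_)
        by_cases h : k = x <;> simp [h, Function.comp]
      have hadd : PySem.Set.add S x = S := by
        simp [PySem.Set.add, PySem.Set.contains, hx]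
      rw [hins, show PySem.Set.update S (x :: rest) = PySem.Set.update (PySem.Set.add S x) rest from rfl,
        hadd]
      exact ih S hnd
    · have hc : (PySem.Dict.mk (pvShapeK S (fun _ => ([] : List Int)))).contains x = false := by
        simp only [PySem.Dict.contains, pvShapeK, List.any_map]
        simp
        exact fun k hk h => hx (h ▸ hk)
      have hins : (PySem.Dict.mk (pvShapeK S (fun _ => ([] : List Int)))).insert x ([] : List Int)
          = PySem.Dict.mk (pvShapeK (S ++ [x]) (fun _ => [])) := by
        simp [PySem.Dict.insert, pvShapeK]
        exact fun h => absurd h hx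
      have hadd : PySem.Set.add S x = S ++ [x] := by
        have hsc : PySem.Set.contains S x = false := by
          simp only [PySem.Set.contains, List.contains_eq_mem, decide_eq_false_iff_not]
          exact hx
        simp [PySem.Set.add]
        exact fun h => absurd h hx
      rw [hins, show PySem.Set.update S (x :: rest) = PySem.Set.update (PySem.Set.add S x) rest from rfl,
        hadd]
      exact ih (S ++ [x]) (by
        simp [List.nodup_append, hnd]
        exact fun a ha h => hx (h ▸ ha))

-- the comb_params entries key k receives from one non-shared block starting at i
def pvOcc (cp : List Int) (l : List String) (k : String) (i : Nat) : List Int :=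
  match l with
  | [] => []
  | x :: xs => (if x = k then [cp.getD i 0] else []) ++ pvOcc cp xs k (i + 1)

-- shared-block inner loop of A
theorem pvSharedStepK (v : Int) :
    ∀ (l K : List String) (f : String → List Int), K.Nodup → (∀ x ∈ l, x ∈ K) →
    l.foldl (fun d x => d.modify x [] (· ++ [v])) (PySem.Dict.mk (pvShapeK K f))
      = PySem.Dict.mk (pvShapeK K (fun k => f k ++ List.replicate (l.count k) v)) := by
  intro l
  induction l with
  | nil =>
    intro K f _ _
    simp [pvShapeK]
  | cons x xs ih =>
    intro K f hnd hmem
    simp only [List.foldl_cons]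
    rw [pvModifyK x (· ++ [v]) K f hnd (hmem x (by simp))]
    rw [ih K _ hnd (fun y hy => hmem y (List.mem_cons_of_mem _ hy))]
    refine congrArg PySem.Dict.mk (List.map_congr_left (fun k hk => ?_))
    by_cases h : k = x
    · subst h
      simp [List.replicate_succ]
    · simp [h, Ne.symm h]

-- non-shared-block inner loop of A
theorem pvSepStepK (cp : List Int) :
    ∀ (l K : List String) (f : String → List Int) (i0 : Nat), K.Nodup → (∀ x ∈ l, x ∈ K) →
    l.foldl (fun (st : PySem.Dict String (List Int) × Nat) x =>
        (st.1.modify x [] (· ++ [cp.getD st.2 0]), st.2 + 1)) (PySem.Dict.mk (pvShapeK K f), i0)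
      = (PySem.Dict.mk (pvShapeK K (fun k => f k ++ pvOcc cp l k i0)), i0 + l.length) := by
  intro l
  induction l with
  | nil =>
    intro K f i0 _ _
    simp [pvShapeK, pvOcc]
  | cons x xs ih =>
    intro K f i0 hnd hmem
    simp only [List.foldl_cons]
    rw [pvModifyK x (· ++ [cp.getD i0 0]) K f hnd (hmem x (by simp))]
    rw [ih K _ (i0 + 1) hnd (fun y hy => hmem y (List.mem_cons_of_mem _ hy))]
    refine Prod.ext ?_ (by simp; omega)
    simp only []
    refine congrArg PySem.Dict.mk (List.map_congr_left (fun k hk => ?_))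
    by_cases h : k = x
    · subst h
      simp [pvOcc]
    · simp [pvOcc, h, Ne.symm h]

-- B's positions loop: group occurrence indices by instrument name
theorem pvPosFold :
    ∀ (jl : List (Int × String)) (S : PySem.Set String) (f : String → List Int),
    S.Nodup → (∀ k, k ∉ S → f k = []) →
    jl.foldl (fun (d : PySem.Dict String (List Int)) ji => d.modify ji.2 [] (· ++ [ji.1]))
        (PySem.Dict.mk (pvShapeK S f))
      = PySem.Dict.mk (pvShapeK (jl.foldl (fun s ji => PySem.Set.add s ji.2) S)
          (fun k => f k ++ (jl.filter (fun ji => ji.2 == k)).map (·.1))) := by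
  intro jl
  induction jl with
  | nil =>
    intro S f _ _
    simp [pvShapeK]
  | cons ji rest ih =>
    intro S f hnd hdef
    simp only [List.foldl_cons]
    by_cases hx : ji.2 ∈ S
    · rw [pvModifyK ji.2 (· ++ [ji.1]) S f hnd hx]
      have hadd : PySem.Set.add S ji.2 = S := by
        simp [PySem.Set.add, PySem.Set.contains, hx]
      rw [ih S _ hnd (fun k hk => by
        have : k ≠ ji.2 := fun h => hk (h ▸ hx)
        simp [this, hdef k hk])]
      rw [hadd]
      refine congrArg PySem.Dict.mk (List.map_congr_left (fun k _ => ?_))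
      by_cases h : k = ji.2
      · subst h
        simp
      · have hne : (ji.2 == k) = false := by
          simp
          exact fun hh => h hh.symm
        simp [h, hne]
    · have hfresh : ∀ q ∈ pvShapeK S f, q.1 ≠ ji.2 := by
        intro q hq
        rcases List.mem_map.1 hq with ⟨k', hk', rfl⟩
        exact fun h => hx (h ▸ hk')
      rw [pvModify_fresh ji.2 _ _ hfresh]
      have hadd : PySem.Set.add S ji.2 = S ++ [ji.2] := by
        have hsc : PySem.Set.contains S ji.2 = false := by
          simp [PySem.Set.contains]
          exact fun h => absurd h hx
        simp [PySem.Set.add]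
        exact fun h => absurd h hx
      have hshape : pvShapeK S f ++ [(ji.2, [] ++ [ji.1])]
          = pvShapeK (S ++ [ji.2]) (fun k => if k = ji.2 then [ji.1] else f k) := by
        simp only [pvShapeK, List.map_append, List.map_cons, List.map_nil]
        refine congrArg₂ List.append (List.map_congr_left (fun k hk => ?_)) (by simp)
        have : k ≠ ji.2 := fun h => hx (h ▸ hk)
        simp [this]
      rw [hshape]
      rw [ih (S ++ [ji.2]) _ (by
          simp [List.nodup_append, hnd]
          exact fun a ha h => hx (h ▸ ha))
        (fun k hk => by
          have h1 : k ∉ S := fun h => hk (by simp [h])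
          have h2 : k ≠ ji.2 := fun h => hk (by simp [h])
          simp [h2, hdef k h1])]
      rw [hadd]
      refine congrArg PySem.Dict.mk (List.map_congr_left (fun k hk => ?_))
      by_cases h : k = ji.2
      · subst h
        simp [hdef ji.2 hx]
      · have hne : (ji.2 == k) = false := by
          simp
          exact fun hh => h hh.symm
        simp [h, hne]

-- Dict.ofList over pairwise-distinct keys keeps the list as items
theorem pvOfList_items :
    ∀ (l : List (String × List Int)) (acc : List (String × List Int)),
    (l.map (·.1)).Nodup → (∀ p ∈ l, ∀ q ∈ acc, q.1 ≠ p.1) →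
    (l.foldl (fun d p => d.insert p.1 p.2) (PySem.Dict.mk acc)).items = acc ++ l := by
  intro l
  induction l with
  | nil => intro acc _ _; simp
  | cons p rest ih =>
    intro acc hnd hfr
    simp only [List.foldl_cons]
    have hc : (PySem.Dict.mk acc).contains p.1 = false := by
      simp [PySem.Dict.contains]
      exact fun a b hab h => absurd h (hfr p (by simp) (a, b) hab)
    have hins : (PySem.Dict.mk acc).insert p.1 p.2 = PySem.Dict.mk (acc ++ [p]) := by
      simp [PySem.Dict.insert, hc]
    rw [hins, ih (acc ++ [p]) (by simpa using (List.nodup_cons.1 (by simpa using hnd)).2)]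
    · simp
    · intro q hq r hr
      rcases List.mem_append.1 hr with h | h
      · exact hfr q (List.mem_cons_of_mem _ hq) r h
      · cases List.mem_singleton.1 h
        have := (List.nodup_cons.1 (by simpa using hnd : (p.1 :: rest.map (·.1)).Nodup)).1
        exact fun hh => this (hh ▸ List.mem_map_of_mem hq)

theorem pvOcc_bridge (cp : List Int) (k : String) :
    ∀ (l : List String) (s : Int) (i0 : Nat), 0 ≤ s →
    pvOcc cp l k i0
      = (((PySem.List.enumerate l s).filter (fun ji => ji.2 == k)).map (·.1)).map
          (fun j => cp.getD (i0 + (j.toNat - s.toNat)) 0) := by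
  intro l
  induction l with
  | nil => intro s i0 _; simp [pvOcc, PySem.List.enumerate]
  | cons x xs ih =>
    intro s i0 hs
    rw [PySem.List.enumerate_cons]
    by_cases h : x = k
    · subst h
      simp only [pvOcc, List.filter_cons, beq_self_eq_true, if_pos, List.map_cons]
      rw [ih (s+1) (i0+1) (by omega)]
      simp only [List.singleton_append]
      refine congrArg₂ List.cons (by simp) ?_
      rw [List.map_map, List.map_map]
      refine List.map_congr_left (fun ji hji => ?_)
      have hmem : ji ∈ PySem.List.enumerate xs (s+1) := (List.mem_filter.1 hji).1
      rcases (PySem.List.mem_enumerate_iff xs (s+1) ji).1 hmem with ⟨c, hc, rfl⟩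
      simp only [Function.comp]
      congr 1
      omega
    · have hne : (x == k) = false := by simp [h]
      simp only [pvOcc, hne, if_neg h, List.filter_cons, List.nil_append]
      rw [ih (s+1) (i0+1) (by omega)]
      rw [List.map_map, List.map_map]
      refine List.map_congr_left (fun ji hji => ?_)
      have hmem : ji ∈ PySem.List.enumerate xs (s+1) := (List.mem_filter.1 hji).1
      rcases (PySem.List.mem_enumerate_iff xs (s+1) ji).1 hmem with ⟨c, hc, rfl⟩
      simp only [Function.comp]
      congr 1
      omega

theorem pvCount_bridge (k : String) :
    ∀ (l : List String) (s : Int),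
    (((PySem.List.enumerate l s).filter (fun ji => ji.2 == k)).map (·.1)).length = l.count k := by
  intro l
  induction l with
  | nil => intro s; simp [PySem.List.enumerate]
  | cons x xs ih =>
    intro s
    rw [PySem.List.enumerate_cons]
    by_cases h : x = k
    · subst h
      simp [ih (s+1)]
    · have hne : (x == k) = false := by simp [h]
      simp [hne, ih (s+1), h]

-- the parameters key k receives from a block table, read off A's interleaved walk
def pvRowA (cp : List Int) (insts : List String) (k : String) (blocks : List (Nat × Bool)) : List Int :=
  blocks.flatMap (fun b =>
    if b.2 then List.replicate (insts.count k) (cp.getD b.1 0) else pvOcc cp insts k b.1)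

theorem pvLoopA_shapeK (cp sh : List Int) (insts : List String) (K : List String)
    (hnd : K.Nodup) (hmem : ∀ x ∈ insts, x ∈ K) :
    ∀ (fuel i : Nat) (p : Int) (f : String → List Int),
    pvLoopA cp sh insts fuel i p (PySem.Dict.mk (pvShapeK K f))
      = PySem.Dict.mk (pvShapeK K
          (fun k => f k ++ pvRowA cp insts k (pvBlocks cp.length insts.length sh fuel i p))) := by
  intro fuel
  induction fuel with
  | zero =>
    intro i p f
    simp [pvLoopA, pvBlocks, pvRowA, pvShapeK]
  | succ fuel ih =>
    intro i p f
    by_cases hi : i < cp.length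
    · by_cases hp : p ∈ sh
      · rw [pvLoopA, if_pos hi, if_pos hp, pvSharedStepK _ insts K f hnd hmem, ih]
        rw [pvBlocks, if_pos hi, if_pos hp]
        refine congrArg PySem.Dict.mk (List.map_congr_left (fun k _ => ?_))
        simp [pvRowA]
      · rw [pvLoopA, if_pos hi, if_neg hp]
        simp only [pvSepStepK cp insts K f i hnd hmem]
        rw [ih]
        rw [pvBlocks, if_pos hi, if_neg hp]
        refine congrArg PySem.Dict.mk (List.map_congr_left (fun k _ => ?_))
        simp [pvRowA]
    · rw [pvLoopA, if_neg hi, pvBlocks, if_neg hi]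
      refine congrArg PySem.Dict.mk (List.map_congr_left (fun k _ => ?_))
      simp [pvRowA]

theorem pvMapFst (K : List String) (g : String → List Int) :
    (pvShapeK K g).map (·.1) = K := by
  simp [pvShapeK, List.map_map, Function.comp_def]

theorem pvEnumAdd :
    ∀ (l : List String) (s : Int) (S : PySem.Set String),
    (PySem.List.enumerate l s).foldl (fun S ji => PySem.Set.add S ji.2) S
      = l.foldl PySem.Set.add S := by
  intro l
  induction l with
  | nil => intro s S; simp [PySem.List.enumerate]
  | cons x xs ih => intro s S; rw [PySem.List.enumerate_cons]; simp [ih (s+1)]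

-- ===== VERDICT (by name: the statement is the Claim_ definition above) =====
theorem separate_gp_params_spec : Claim_equal_separate_gp_params := by
  intro cp sh insts _ _
  unfold Spec_separate_gp_params separate_gp_params separate_gp_params_alt
  simp only []
  have hnd : (PySem.Set.ofList insts).Nodup := PySem.Set.nodup_ofList insts
  have hmem : ∀ x ∈ insts, x ∈ PySem.Set.ofList insts :=
    fun x hx => (PySem.Set.mem_ofList insts x).2 hx
  -- A's initial dict
  have h0 : insts.foldl (fun d inst => d.insert inst []) (PySem.Dict.mk [])
      = PySem.Dict.mk (pvShapeK (PySem.Set.ofList insts) (fun _ => [])) :=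
    pvInitK insts [] List.nodup_nil
  rw [h0, pvLoopA_shapeK cp sh insts (PySem.Set.ofList insts) hnd hmem]
  -- B's positions dict
  have hpos : (PySem.List.enumerate insts).foldl
      (fun (d : PySem.Dict String (List Int)) ji => d.modify ji.2 [] (· ++ [ji.1]))
      (PySem.Dict.mk [])
      = PySem.Dict.mk (pvShapeK (PySem.Set.ofList insts)
          (fun k => ((PySem.List.enumerate insts).filter (fun ji => ji.2 == k)).map (·.1))) := by
    have h := pvPosFold (PySem.List.enumerate insts) [] (fun _ => [])
      List.nodup_nil (fun _ _ => rfl)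
    rw [show (PySem.Dict.mk (pvShapeK [] (fun _ => ([] : List Int)))) = PySem.Dict.mk [] from rfl] at h
    rw [h, pvEnumAdd insts 0 []]
    rfl
  rw [hpos]
  -- B's gathered dict
  set blocks := pvBlocks cp.length insts.length sh (cp.length + 1) 0 0 with hblocks
  set jsF : String → List Int :=
    fun k => ((PySem.List.enumerate insts).filter (fun ji => ji.2 == k)).map (·.1) with hjsF
  have hitems : (PySem.Dict.mk (pvShapeK (PySem.Set.ofList insts) jsF)).items
      = pvShapeK (PySem.Set.ofList insts) jsF := rfl
  rw [hitems]
  have hmapmap : (pvShapeK (PySem.Set.ofList insts) jsF).map (fun kjs =>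
      (kjs.1, blocks.flatMap (fun b => kjs.2.map (fun j =>
        if b.2 then cp.getD b.1 0 else cp.getD (b.1 + j.toNat) 0))))
      = pvShapeK (PySem.Set.ofList insts) (fun k =>
          blocks.flatMap (fun b => (jsF k).map (fun j =>
            if b.2 then cp.getD b.1 0 else cp.getD (b.1 + j.toNat) 0))) := by
    simp [pvShapeK, List.map_map, Function.comp]
  rw [hmapmap]
  set L := pvShapeK (PySem.Set.ofList insts) (fun k =>
      blocks.flatMap (fun b => (jsF k).map (fun j =>
        if b.2 then cp.getD b.1 0 else cp.getD (b.1 + j.toNat) 0))) with hLdef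
  have hpd : PySem.Dict.ofList L = PySem.Dict.mk L := by
    have hk : (L.map (·.1)).Nodup := by
      rw [hLdef, pvMapFst]
      exact hnd
    have hL : (PySem.Dict.ofList L).items = [] ++ L := pvOfList_items L [] hk (by simp)
    calc PySem.Dict.ofList L = PySem.Dict.mk (PySem.Dict.ofList L).items := rfl
      _ = PySem.Dict.mk L := by rw [hL]; simp
  rw [hpd]
  -- the two dicts coincide key by key
  have hrow : pvShapeK (PySem.Set.ofList insts)
      (fun k => [] ++ pvRowA cp insts k blocks)
      = pvShapeK (PySem.Set.ofList insts) (fun k =>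
          blocks.flatMap (fun b => (jsF k).map (fun j =>
            if b.2 then cp.getD b.1 0 else cp.getD (b.1 + j.toNat) 0))) := by
    refine List.map_congr_left (fun k _ => ?_)
    simp only [List.nil_append, Prod.mk.injEq, true_and]
    unfold pvRowA
    rw [List.flatMap_def, List.flatMap_def]
    refine congrArg List.flatten (List.map_congr_left (fun b _ => ?_))
    by_cases hb : b.2
    · simp only [hb, if_pos]
      rw [List.map_const', hjsF]
      rw [pvCount_bridge k insts 0]
    · simp only [Bool.not_eq_true] at hb
      rw [pvOcc_bridge cp k insts 0 b.1 le_rfl, hjsF]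
      simp only [hb, Bool.false_eq_true, if_false, List.map_map]
      refine List.map_congr_left (fun ji _ => ?_)
      simp [Function.comp]
  rw [hrow]
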